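-- pv_equiv track=rewrite | github.com/kittilsenstian-debug/the-hand | theory-tools/all_fibers_physics.py | theta2_mod_p
-- ===== SOURCE A (Python) =====
-- import math
--
-- def theta2_mod_p(q, p, N=None):
--     """
--     θ₂(q) = 2·∑_{n=0}^{N} q^{(n+1/2)²} mod p.
--     Issue: (n+1/2)² = n²+n+1/4. Need 4th root of q or work with q^{4(n+1/2)²}.
--     Instead: θ₂(q) = 2·q^{1/4}·∑ q^{n²+n}. We compute the sum part.
--     """
--     if N is None:
--         N = int(math.sqrt(p)) + 5
--     result = 0
--     for n in range(0, N + 1):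
--         exp = n * n + n  # n² + n
--         qe = pow(q, exp, p)
--         result = (result + qe) % p
--     return (2 * result) % p  # without the q^{1/4} prefactor
-- ===== SOURCE B (Python) =====
-- import math
--
-- def theta2_mod_p(q, p, N=None):
--     # One modular exponentiation total: maintain q^(n*n+n) mod p incrementally
--     # (multiply by q^(2n+2), itself updated by q^2), instead of pow() each iteration.
--     if N is None:
--         N = int(math.sqrt(p)) + 5
--     q2 = (q * q) % p
--     result = 0
--     term = 1 % p          # q^(0*0+0) mod p
--     step = q2             # q^(2*0+2) mod p
--     for _ in range(N + 1):
--         result = (result + term) % p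
--         term = (term * step) % p
--         step = (step * q2) % p
--     return (2 * result) % p
-- ===== Notes on version B (the rewrite author's own statement) =====
-- stated objective: faster
-- what changed: Replaces the per-iteration modular exponentiation pow(q, n*n+n, p) with an incremental update: the running power q^(n*n+n) mod p is multiplied by q^(2n+2) mod p each step, which is itself updated by a fixed factor q^2 mod p.
import Mathlib
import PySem

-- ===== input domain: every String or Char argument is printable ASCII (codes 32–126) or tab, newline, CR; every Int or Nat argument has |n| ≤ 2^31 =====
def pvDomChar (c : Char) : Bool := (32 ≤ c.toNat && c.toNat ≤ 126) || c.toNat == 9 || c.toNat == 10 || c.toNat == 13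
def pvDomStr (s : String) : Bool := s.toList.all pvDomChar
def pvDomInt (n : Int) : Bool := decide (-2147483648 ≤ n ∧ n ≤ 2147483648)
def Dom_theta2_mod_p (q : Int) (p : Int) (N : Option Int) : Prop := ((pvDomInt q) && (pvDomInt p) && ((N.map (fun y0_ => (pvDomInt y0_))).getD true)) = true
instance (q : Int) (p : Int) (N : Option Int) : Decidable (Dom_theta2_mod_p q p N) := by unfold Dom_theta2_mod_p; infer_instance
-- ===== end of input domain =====

-- B replaces the per-iteration modular exponentiation pow(q, n*n+n, p) by an
-- incremental update of q^(n*n+n) mod p (multiply by q^(2n+2), itself updated by q^2);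
-- objective: faster (one multiplication per iteration instead of a pow() call).

-- ===== PORT A =====
-- pow(b, e, m) for e ≥ 0: CPython's binary square-and-multiply modular exponentiation;
-- exact (proved equal to PySem.Int.powMod in pyPowMod_eq below; written out because the
-- spec form mod (b^e) m is not evaluable for the e ~ 10^9 this function reaches).
def pyPowMod (b : Int) (e : Nat) (m : Int) : Int :=
  if h : e = 0 then PySem.Int.mod 1 m
  else
    let r := pyPowMod (PySem.Int.mod (b * b) m) (e / 2) m
    if e % 2 = 1 then PySem.Int.mod (r * b) m else r
decreasing_by exact Nat.div_lt_self (Nat.pos_of_ne_zero h) (by norm_num)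

-- int(math.sqrt(p)) for 0 < p ≤ 2^31: math.sqrt is correctly rounded and p is far below
-- 2^52, so truncation equals the integer square root Nat.sqrt (exact on Dom with 0 < p).
def theta2_mod_p (q : Int) (p : Int) (N : Option Int) : Int :=
  let Nv : Int := match N with
    | none => (Nat.sqrt p.toNat : Int) + 5
    | some n => n
  let result : Int :=
    (PySem.List.pyRange 0 (Nv + 1) 1).foldl
      (fun result n =>
        let exp := n * n + n
        let qe := pyPowMod q exp.toNat p   -- pow(q, exp, p); exp ≥ 0 on the range
        PySem.Int.mod (result + qe) p) 0
  PySem.Int.mod (2 * result) p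

-- ===== PORT B =====
-- the 'for _ in range(N+1)' loop of Source B, as recursion on the iteration count
def theta2AltLoop (q2 p : Int) : Nat → Int → Int → Int → Int
  | 0, result, _, _ => result
  | k + 1, result, term, step =>
      theta2AltLoop q2 p k (PySem.Int.mod (result + term) p)
        (PySem.Int.mod (term * step) p) (PySem.Int.mod (step * q2) p)

def theta2_mod_p_alt (q : Int) (p : Int) (N : Option Int) : Int :=
  let Nv : Int := match N with
    | none => (Nat.sqrt p.toNat : Int) + 5
    | some n => n
  let q2 := PySem.Int.mod (q * q) p
  let result := theta2AltLoop q2 p (Nv + 1).toNat 0 (PySem.Int.mod 1 p) q2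
  PySem.Int.mod (2 * result) p

-- ===== PRECONDITION & SPEC =====
-- Pre_ excludes exactly the inputs where A raises: p = 0 (pow/% with zero modulus,
-- ValueError) and N = None with p < 0 (math.sqrt of a negative, ValueError).
def Pre_theta2_mod_p (q : Int) (p : Int) (N : Option Int) : Prop :=
  p ≠ 0 ∧ (N = none → 0 < p)
instance (q : Int) (p : Int) (N : Option Int) : Decidable (Pre_theta2_mod_p q p N) := by unfold Pre_theta2_mod_p; infer_instance
def pvWitness_theta2_mod_p : Int × Int × Option Int := (3, 7, some 4)

def Spec_theta2_mod_p (q : Int) (p : Int) (N : Option Int) (out : Int) : Prop := out = theta2_mod_p_alt q p N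
instance (q : Int) (p : Int) (N : Option Int) (out : Int) : Decidable (Spec_theta2_mod_p q p N out) := by unfold Spec_theta2_mod_p; infer_instance

-- ===== CLAIM (what is proved, stated in full; the proofs are below) =====
def Claim_equal_theta2_mod_p : Prop := ∀ (q : Int) (p : Int) (N : Option Int), Dom_theta2_mod_p q p N → Pre_theta2_mod_p q p N → Spec_theta2_mod_p q p N (theta2_mod_p q p N)

-- ===== LEMMAS AND PROOFS =====

theorem fmod_pow_fmod (x m : Int) (k : Nat) : ((x.fmod m) ^ k).fmod m = (x ^ k).fmod m := by
  induction k with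
  | zero => simp
  | succ k ih =>
      rw [pow_succ, pow_succ, Int.mul_fmod, ih, Int.fmod_fmod, ← Int.mul_fmod]

theorem pyPowMod_eq (b : Int) (e : Nat) (m : Int) :
    pyPowMod b e m = PySem.Int.mod (b ^ e) m := by
  induction e using Nat.strong_induction_on generalizing b with
  | _ e ih =>
    rw [pyPowMod]
    by_cases h : e = 0
    · simp [h]
    · simp only [h, dite_false]
      have hlt : e / 2 < e := Nat.div_lt_self (Nat.pos_of_ne_zero h) (by norm_num)
      have hr : pyPowMod (PySem.Int.mod (b * b) m) (e / 2) m
          = PySem.Int.mod (b ^ (2 * (e / 2))) m := by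
        rw [ih (e / 2) hlt]
        show (((b * b).fmod m) ^ (e / 2)).fmod m = _
        rw [fmod_pow_fmod]
        congr 1
        rw [two_mul, pow_add, mul_pow]
      by_cases h2 : e % 2 = 1
      · simp only [h2, if_true, hr]
        show ((b ^ (2 * (e / 2))).fmod m * b).fmod m = (b ^ e).fmod m
        rw [Int.mul_fmod, Int.fmod_fmod, ← Int.mul_fmod, ← pow_succ]
        congr 2
        omega
      · simp only [h2, if_false, hr]
        congr 2
        omega

-- the two loops agree: altLoop starting at step s with term = q^(s²+s) mod p and
-- step = q^(2s+2) mod p computes A's fold over range(s, s+k)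
theorem theta2_loop_eq (q p : Int) :
    ∀ (k s : Nat) (r : Int),
      theta2AltLoop (PySem.Int.mod (q * q) p) p k r
        (PySem.Int.mod (q ^ (s * s + s)) p) (PySem.Int.mod (q ^ (2 * s + 2)) p)
      = (PySem.List.pyRange (s : Int) ((s : Int) + k) 1).foldl
          (fun result n =>
            PySem.Int.mod (result + PySem.Int.mod (q ^ (n * n + n).toNat) p) p) r := by
  intro k
  induction k with
  | zero =>
      intro s r
      rw [PySem.List.pyRange_one_eq_nil (by omega)]
      rfl
  | succ k ih =>
      intro s r
      push_cast
      rw [PySem.List.pyRange_one_cons (by omega : (s : Int) < (s : Int) + ((k : Int) + 1))]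
      simp only [List.foldl_cons]
      have hcast : ((s : Int) * (s : Int) + (s : Int)).toNat = s * s + s := by
        have : ((s : Int) * (s : Int) + (s : Int)) = ((s * s + s : Nat) : Int) := by push_cast; ring
        rw [this, Int.toNat_natCast]
      have hterm : PySem.Int.mod
          (PySem.Int.mod (q ^ (s * s + s)) p * PySem.Int.mod (q ^ (2 * s + 2)) p) p
          = PySem.Int.mod (q ^ ((s + 1) * (s + 1) + (s + 1))) p := by
        simp only [PySem.Int.mod]
        rw [← Int.mul_fmod, ← pow_add]
        congr 2
        ring
      have hstep : PySem.Int.mod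
          (PySem.Int.mod (q ^ (2 * s + 2)) p * PySem.Int.mod (q * q) p) p
          = PySem.Int.mod (q ^ (2 * (s + 1) + 2)) p := by
        simp only [PySem.Int.mod]
        rw [← Int.mul_fmod]
        congr 2
        ring
      show theta2AltLoop _ _ _ _ _ _ = _
      rw [theta2AltLoop, hterm, hstep, hcast]
      have := ih (s + 1) (PySem.Int.mod (r + PySem.Int.mod (q ^ (s * s + s)) p) p)
      push_cast at this
      rw [show (s : Int) + 1 + (k : Int) = (s : Int) + ((k : Int) + 1) from by ring] at this
      rw [this]

-- both sides for an already-resolved bound Nv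
theorem theta2_core (q p Nv : Int) :
    PySem.Int.mod (2 * ((PySem.List.pyRange 0 (Nv + 1) 1).foldl
      (fun result n => PySem.Int.mod (result + pyPowMod q (n * n + n).toNat p) p) 0)) p
  = PySem.Int.mod (2 * theta2AltLoop (PySem.Int.mod (q * q) p) p (Nv + 1).toNat 0
      (PySem.Int.mod 1 p) (PySem.Int.mod (q * q) p)) p := by
  simp only [pyPowMod_eq]
  by_cases h : 0 ≤ Nv
  · have hk : ((Nv + 1).toNat : Int) = Nv + 1 := Int.toNat_of_nonneg (by omega)
    have := theta2_loop_eq q p (Nv + 1).toNat 0 0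
    simp only [Nat.cast_zero, zero_add, Nat.mul_zero, pow_zero] at this
    rw [hk] at this
    have hq2 : PySem.Int.mod (q ^ (2 * 0 + 2)) p = PySem.Int.mod (q * q) p := by
      norm_num [sq]
    rw [hq2] at this
    rw [← this]
  · have h1 : Nv + 1 ≤ 0 := by omega
    rw [PySem.List.pyRange_one_eq_nil h1, Int.toNat_of_nonpos h1]
    rfl

theorem theta2_mod_p_spec : Claim_equal_theta2_mod_p := by
  unfold Claim_equal_theta2_mod_p
  intro q p N _hDom _hPre
  unfold Spec_theta2_mod_p
  cases N with
  | none => exact theta2_core q p ((Nat.sqrt p.toNat : Int) + 5)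
  | some n => exact theta2_core q p n
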